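-- pv_equiv track=rewrite | github.com/CatkinCai0706/jike-crawler | jike_pipeline.py | build_anchor_map
-- ===== SOURCE A (Python) =====
-- from collections import Counter, defaultdict
-- from typing import Any
--
-- def unique_preserve(items: list[str]) -> list[str]:
--     seen: set[str] = set()
--     ordered: list[str] = []
--     for item in items:
--         if not item or item in seen:
--             continue
--         seen.add(item)
--         ordered.append(item)
--     return ordered
--
-- def build_anchor_map(anchor_followers: dict[str, Any]) -> dict[str, list[str]]:
--     reverse_map: defaultdict[str, list[str]] = defaultdict(list)
--     for anchor_id, payload in anchor_followers.items():
--         for user in payload.get("followers", []):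
--             user_id = user.get("id")
--             if not user_id:
--                 continue
--             reverse_map[user_id].append(anchor_id)
--     return {user_id: unique_preserve(anchor_ids) for user_id, anchor_ids in reverse_map.items()}
-- ===== SOURCE B (Python) =====
-- def build_anchor_map(anchor_followers: dict) -> dict:
--     # Staged pipeline: flatten to an ordered (follower, anchor) pair list, then
--     # group: key order = first occurrence, value = dict.fromkeys-dedup of the
--     # nonempty anchors paired with that follower.
--     pairs = [(user.get("id"), anchor_id)
--              for anchor_id, payload in anchor_followers.items()
--              for user in payload.get("followers", [])
--              if user.get("id")]
--     keys = list(dict.fromkeys(u for u, _ in pairs))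
--     return {u: list(dict.fromkeys(a for v, a in pairs if v == u and a))
--             for u in keys}
-- ===== Notes on version B (the rewrite author's own statement) =====
-- stated objective: alternative
-- what changed: Replaces A's incremental defaultdict inversion plus per-value unique_preserve rewrite by a staged pipeline: flatten everything to one ordered (follower, anchor) pair list, take dict.fromkeys of the follower ids for the key order, and build each value by filtering the pair list and deduplicating with dict.fromkeys; no mutable per-key accumulators and no helper.
import Mathlib
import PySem

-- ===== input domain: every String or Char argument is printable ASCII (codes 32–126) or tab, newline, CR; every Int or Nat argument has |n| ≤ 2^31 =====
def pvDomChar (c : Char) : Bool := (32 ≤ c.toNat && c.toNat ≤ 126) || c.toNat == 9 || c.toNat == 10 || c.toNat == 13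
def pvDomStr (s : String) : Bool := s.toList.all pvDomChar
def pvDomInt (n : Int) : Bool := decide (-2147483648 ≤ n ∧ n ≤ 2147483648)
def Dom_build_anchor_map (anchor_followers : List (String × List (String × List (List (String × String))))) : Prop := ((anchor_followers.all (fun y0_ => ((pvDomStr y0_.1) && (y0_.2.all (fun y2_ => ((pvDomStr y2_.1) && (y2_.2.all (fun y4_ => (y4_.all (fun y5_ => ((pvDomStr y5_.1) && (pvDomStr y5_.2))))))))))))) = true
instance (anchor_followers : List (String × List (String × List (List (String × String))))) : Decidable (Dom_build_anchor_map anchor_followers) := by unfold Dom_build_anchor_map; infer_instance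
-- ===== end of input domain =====

-- B replaces A's incremental defaultdict inversion + unique_preserve rewrite by a staged
-- pipeline (flatten to an ordered pair list, then group by filtering it per distinct
-- follower); objective: alternative decomposition, the proof is about the return value.

-- ===== PORT A =====
-- A's helper: seen-set + ordered-list accumulator
def unique_preserve (items : List String) : List String :=
  (items.foldl
    (fun (st : PySem.Set String × List String) item =>
      if item = "" ∨ st.1.contains item then st
      else (PySem.Set.add st.1 item, st.2 ++ [item]))
    ((PySem.Set.empty : PySem.Set String), ([] : List String))).2

-- A's inner loop body: one follower `user` under anchor `a`
def stepA (a : String) (rm : PySem.Dict String (List String))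
    (user : List (String × String)) : PySem.Dict String (List String) :=
  match (PySem.Dict.ofList user).get? "id" with
  | none => rm
  | some uid => if uid = "" then rm else rm.modify uid [] (fun l => l ++ [a])

-- A's local variable reverse_map (the defaultdict after both loops)
def reverse_map_A (anchor_followers : List (String × List (String × List (List (String × String))))) : PySem.Dict String (List String) :=
  (PySem.Dict.ofList anchor_followers).items.foldl
    (fun rm ap => ((PySem.Dict.ofList ap.2).getD "followers" []).foldl (stepA ap.1) rm)
    PySem.Dict.empty

def build_anchor_map (anchor_followers : List (String × List (String × List (List (String × String))))) : List (String × List String) :=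
  -- the final dict comprehension over reverse_map.items()
  ((reverse_map_A anchor_followers).items.foldl
      (fun d p => d.insert p.1 (unique_preserve p.2)) PySem.Dict.empty).items

-- ===== PORT B =====
-- the pair-comprehension filter: user.get("id") when truthy, paired with the anchor
def fB (a : String) (user : List (String × String)) : Option (String × String) :=
  match (PySem.Dict.ofList user).get? "id" with
  | none => none
  | some uid => if uid = "" then none else some (uid, a)

-- Source B's `pairs` comprehension: the flattened ordered (follower, anchor) pair list
def pairsB (anchor_followers : List (String × List (String × List (List (String × String))))) : List (String × String) :=
  (PySem.Dict.ofList anchor_followers).items.flatMap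
    (fun ap => ((PySem.Dict.ofList ap.2).getD "followers" []).filterMap (fB ap.1))

def build_anchor_map_alt (anchor_followers : List (String × List (String × List (List (String × String))))) : List (String × List String) :=
  let pairs := pairsB anchor_followers
  let keys := PySem.List.dedup (pairs.map Prod.fst)   -- list(dict.fromkeys(...))
  keys.map (fun u =>
    (u, PySem.List.dedup
          ((pairs.filter (fun p => p.1 == u && !(p.2 == ""))).map Prod.snd)))

-- ===== PRECONDITION & SPEC =====
def Spec_build_anchor_map (anchor_followers : List (String × List (String × List (List (String × String))))) (out : List (String × List String)) : Prop := out = build_anchor_map_alt anchor_followers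
instance (anchor_followers : List (String × List (String × List (List (String × String))))) (out : List (String × List String)) : Decidable (Spec_build_anchor_map anchor_followers out) := by unfold Spec_build_anchor_map; infer_instance

-- ===== CLAIM (what is proved, stated in full; the proofs are below) =====
def Claim_equal_build_anchor_map : Prop := ∀ (anchor_followers : List (String × List (String × List (List (String × String))))), Dom_build_anchor_map anchor_followers → Spec_build_anchor_map anchor_followers (build_anchor_map anchor_followers)

-- ===== LEMMAS AND PROOFS =====

-- the grouping of a pair list: keys in first-occurrence order, values the paired anchors
def grp (ps : List (String × String)) : List (String × List String) :=
  (PySem.Set.ofList (ps.map Prod.fst)).map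
    (fun u => (u, (ps.filter (fun p => p.1 == u)).map Prod.snd))

lemma keys_of_grp {r : PySem.Dict String (List String)} {ps : List (String × String)}
    (h : r.items = grp ps) : r.keys = PySem.Set.ofList (ps.map Prod.fst) := by
  simp [PySem.Dict.keys, h, grp, List.map_map, Function.comp_def]

lemma dict_modify_eq {ν : Type} (d : PySem.Dict String ν) (k : String) (d0 : ν)
    (f : ν → ν) : d.modify k d0 f = d.insert k (f (d.getD k d0)) := rfl

-- one follower step preserves the grouping invariant
lemma stepA_grp (a : String) (ps : List (String × String))
    (r : PySem.Dict String (List String)) (user : List (String × String))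
    (h : r.items = grp ps) :
    (stepA a r user).items = grp (ps ++ (fB a user).toList) := by
  unfold stepA fB
  cases hid : (PySem.Dict.ofList user).get? "id" with
  | none => simpa using h
  | some uid =>
    by_cases huid : uid = ""
    · simpa [huid] using h
    · simp only [if_neg huid, Option.toList]
      have hkeys : r.keys = PySem.Set.ofList (ps.map Prod.fst) := keys_of_grp h
      have hnd : r.keys.Nodup := by rw [hkeys]; exact PySem.Set.nodup_ofList _
      rw [dict_modify_eq]
      have hmapfst : (ps ++ [(uid, a)]).map Prod.fst = ps.map Prod.fst ++ [uid] := by simp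
      by_cases hm : uid ∈ ps.map Prod.fst
      · -- existing key
        have hc : r.contains uid = true := by
          rw [PySem.Dict.contains_eq_decide_mem_keys, hkeys]
          simp [PySem.Set.mem_ofList, hm]
        have hmem : (uid, (ps.filter (fun p => p.1 == uid)).map Prod.snd) ∈ r.items := by
          rw [h]
          exact List.mem_map.mpr ⟨uid, (PySem.Set.mem_ofList _ _).mpr hm, rfl⟩
        have hgd : r.getD uid [] = (ps.filter (fun p => p.1 == uid)).map Prod.snd :=
          PySem.Dict.getD_of_mem_items _ hmem hnd []
        rw [hgd, PySem.Dict.items_insert_of_contains _ _ hc, h]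
        have hks : PySem.Set.ofList ((ps ++ [(uid, a)]).map Prod.fst)
            = PySem.Set.ofList (ps.map Prod.fst) := by
          rw [hmapfst, PySem.Set.ofList_append_singleton,
            PySem.Set.add_of_mem ((PySem.Set.mem_ofList _ _).mpr hm)]
        unfold grp
        rw [hks, List.map_map]
        refine List.map_congr_left ?_
        intro u _
        by_cases hu : u = uid
        · simp [hu, List.filter_append]
        · have : ¬ (uid = u) := fun h' => hu h'.symm
          simp [hu, this, List.filter_append]
      · -- fresh key
        have hc : r.contains uid = false := by
          rw [PySem.Dict.contains_eq_decide_mem_keys, hkeys]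
          simp [PySem.Set.mem_ofList, hm]
        have hgd : r.getD uid [] = [] := PySem.Dict.getD_of_not_contains r _ hc
        rw [hgd, PySem.Dict.items_insert_of_not_contains _ _ hc, h]
        have hks : PySem.Set.ofList ((ps ++ [(uid, a)]).map Prod.fst)
            = PySem.Set.ofList (ps.map Prod.fst) ++ [uid] := by
          rw [hmapfst, PySem.Set.ofList_append_singleton,
            PySem.Set.add_of_not_mem (fun hx => hm ((PySem.Set.mem_ofList _ _).mp hx))]
        have hfilt : ps.filter (fun p => p.1 == uid) = [] := by
          refine List.filter_eq_nil_iff.mpr ?_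
          intro p hp hpd
          exact hm (List.mem_map.mpr ⟨p, hp, (beq_iff_eq.mp hpd)⟩)
        unfold grp
        rw [hks, List.map_append]
        congr 1
        · refine List.map_congr_left ?_
          intro u hu
          have hne : ¬ (uid = u) := fun h' =>
            hm (h' ▸ (PySem.Set.mem_ofList _ _).mp hu)
          simp [List.filter_append, hne]
        · simp [List.filter_append, hfilt]

lemma inner_grp (a : String) (us : List (List (String × String)))
    (r : PySem.Dict String (List String)) (ps : List (String × String))
    (h : r.items = grp ps) :
    (us.foldl (stepA a) r).items = grp (ps ++ us.filterMap (fB a)) := by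
  induction us generalizing r ps with
  | nil => simpa using h
  | cons u us ih =>
    have h1 := stepA_grp a ps r u h
    have h2 := ih (stepA a r u) (ps ++ (fB a u).toList) h1
    rw [List.foldl_cons, h2, List.filterMap_cons]
    cases fB a u <;> simp

lemma outer_grp (l : List (String × List (String × List (List (String × String)))))
    (r : PySem.Dict String (List String)) (ps : List (String × String))
    (h : r.items = grp ps) :
    (l.foldl (fun rm ap => ((PySem.Dict.ofList ap.2).getD "followers" []).foldl (stepA ap.1) rm) r).items
    = grp (ps ++ l.flatMap (fun ap => ((PySem.Dict.ofList ap.2).getD "followers" []).filterMap (fB ap.1))) := by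
  induction l generalizing r ps with
  | nil => simpa using h
  | cons ap l ih =>
    have h1 := inner_grp ap.1 ((PySem.Dict.ofList ap.2).getD "followers" []) r ps h
    have h2 := ih _ _ h1
    rw [List.foldl_cons, h2, List.flatMap_cons, List.append_assoc]

lemma upl_eq_ofList (l : List String) :
    unique_preserve l = PySem.Set.ofList (l.filter (fun x => !(x == ""))) := by
  suffices h : ∀ s : List String,
      (l.foldl
        (fun (st : PySem.Set String × List String) item =>
          if item = "" ∨ st.1.contains item then st
          else (PySem.Set.add st.1 item, st.2 ++ [item])) (s, s))
      = ((l.filter (fun x => !(x == ""))).foldl PySem.Set.add s,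
         (l.filter (fun x => !(x == ""))).foldl PySem.Set.add s) by
    have h0 := h []
    simp only [unique_preserve]
    rw [show ((PySem.Set.empty : PySem.Set String), ([] : List String))
          = (([] : List String), ([] : List String)) from rfl, h0]
    rfl
  intro s
  induction l generalizing s with
  | nil => rfl
  | cons a l ih =>
    simp only [List.foldl_cons, List.filter_cons]
    by_cases ha : a = ""
    · simpa [ha, PySem.Set.contains] using ih s
    · by_cases hm : a ∈ s
      · have h1 : PySem.Set.add s a = s := PySem.Set.add_of_mem hm
        simpa [ha, hm, PySem.Set.contains, h1] using ih s
      · have h1 : PySem.Set.add s a = s ++ [a] := PySem.Set.add_of_not_mem hm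
        simpa [ha, hm, PySem.Set.contains, h1] using ih (s ++ [a])

-- ===== VERDICT (by name: the statement is the Claim_ definition above) =====
theorem build_anchor_map_spec : Claim_equal_build_anchor_map := by
  intro af _
  unfold Spec_build_anchor_map build_anchor_map build_anchor_map_alt
  have hg : (reverse_map_A af).items = grp (pairsB af) := by
    unfold reverse_map_A pairsB
    simpa using outer_grp (PySem.Dict.ofList af).items PySem.Dict.empty [] rfl
  have hndk : ((reverse_map_A af).items.map (fun p => p.1)).Nodup := by
    rw [hg]
    simpa [grp, List.map_map, Function.comp_def] using
      PySem.Set.nodup_ofList ((pairsB af).map Prod.fst)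
  have hfresh := PySem.Dict.items_foldl_insert_fresh (reverse_map_A af).items
    (fun p => p.1) (fun p => unique_preserve p.2) PySem.Dict.empty
    (fun p _ => PySem.Dict.contains_empty _) hndk
  simp only at hfresh
  rw [hfresh, hg]
  rw [show (PySem.Dict.empty : PySem.Dict String (List String)).items = [] from rfl,
    List.nil_append]
  unfold grp
  rw [List.map_map]
  simp only [PySem.List.dedup_eq_ofList]
  refine List.map_congr_left ?_
  intro u _
  simp only [Function.comp_def]
  rw [upl_eq_ofList, List.filter_map, List.filter_filter]
  have hpred : ∀ p : String × String,
      (((fun x => !(x == "")) ∘ Prod.snd) p && p.1 == u) = (p.1 == u && !(p.2 == "")) := by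
    intro p; simp [Bool.and_comm]
  rw [List.filter_congr (fun p _ => hpred p)]
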